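-- pv_equiv track=rewrite | github.com/col-a-guo/kaisadamage | tanksim.py | calculate_team_traits
-- ===== SOURCE A (Python) =====
-- bastion_champions = {"Jax", "Poppy", "Illaoi", "Shyvana", "Galio", "Sejuani", "Renekton"}
--
-- vanguard_champions = {"Sylas", "Vi", "Rhaast", "Skarner", "Braum", "Jarvan IV", "Leona"}
--
-- bruiser_champions = {"Alistar", "Dr Mundo", "Darius", "Gragas", "Mordekaiser", "Chogath", "Kobuko"}
--
-- anima_champions = {"Seraphine", "Sylas", "Illaoi", "Vayne", "Yuumi", "Leona", "Xayah", "Aurora"}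
--
-- exotech_champions = {"Jax", "Jhin", "Naafiri", "Mordekaiser", "Varus", "Sejuani", "Zeri"}
--
-- street_demon_champions = {"Dr Mundo", "Zyra", "Ekko", "Jinx", "Rengar", "Brand", "Neeko"}
--
-- syndicate_champions = {"Shaco", "Darius", "Twisted Fate", "Braum", "Miss Fortune"}
--
-- def calculate_team_traits(champion_list):
--     traits = {}
--
--     # Count the traits
--     bastion_count = sum(1 for champ in champion_list if champ in bastion_champions)
--     vanguard_count = sum(1 for champ in champion_list if champ in vanguard_champions)
--     bruiser_count = sum(1 for champ in champion_list if champ in bruiser_champions)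
--     anima_count = sum(1 for champ in champion_list if champ in anima_champions)
--     exotech_count = sum(1 for champ in champion_list if champ in exotech_champions)
--     street_demon_count = sum(1 for champ in champion_list if champ in street_demon_champions)
--     syndicate_count = sum(1 for champ in champion_list if champ in syndicate_champions)
--
--     # Add active traits to dictionary
--     if bastion_count >= 2:
--         traits["Bastion"] = 6 if bastion_count >= 6 else 4 if bastion_count >= 4 else 2
--
--     if vanguard_count >= 2:
--         traits["Vanguard"] = 6 if vanguard_count >= 6 else 4 if vanguard_count >= 4 else 2
--
--     if bruiser_count >= 2:
--         traits["Bruiser"] = 6 if bruiser_count >= 6 else 4 if bruiser_count >= 4 else 2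
--
--     if anima_count >= 3:
--         if anima_count >= 10:
--             traits["Anima Squad"] = 10
--         elif anima_count >= 7:
--             traits["Anima Squad"] = 7
--         elif anima_count >= 5:
--             traits["Anima Squad"] = 5
--         else:
--             traits["Anima Squad"] = 3
--
--     if exotech_count >= 3:
--         if exotech_count >= 10:
--             traits["Exotech"] = 10
--         elif exotech_count >= 7:
--             traits["Exotech"] = 7
--         elif exotech_count >= 5:
--             traits["Exotech"] = 5
--         else:
--             traits["Exotech"] = 3
--
--     if street_demon_count >= 3:
--         if street_demon_count >= 10:
--             traits["street_demon Hex"] = 10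
--         elif street_demon_count >= 7:
--             traits["street_demon Hex"] = 7
--         elif street_demon_count >= 5:
--             traits["street_demon Hex"] = 5
--         else:
--             traits["street_demon Hex"] = 3
--
--     if syndicate_count >= 3:
--         traits["Syndicate"] = 7 if syndicate_count >= 7 else 5 if syndicate_count >= 5 else 3
--
--     return traits
-- ===== SOURCE B (Python) =====
-- # B: one pass over champion_list with a precomputed inverted index (champion -> traits),
-- # then a static table of (trait, activation threshold, tier breakpoints) assigns tiers.
--
-- _TRAIT_TABLE = [
--     ("Bastion", 2, [(6, 6), (4, 4), (2, 2)]),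
--     ("Vanguard", 2, [(6, 6), (4, 4), (2, 2)]),
--     ("Bruiser", 2, [(6, 6), (4, 4), (2, 2)]),
--     ("Anima Squad", 3, [(10, 10), (7, 7), (5, 5), (3, 3)]),
--     ("Exotech", 3, [(10, 10), (7, 7), (5, 5), (3, 3)]),
--     ("street_demon Hex", 3, [(10, 10), (7, 7), (5, 5), (3, 3)]),
--     ("Syndicate", 3, [(7, 7), (5, 5), (3, 3)]),
-- ]
--
-- # inverted index: champion name -> list of traits it belongs to
-- _CHAMP_TRAITS = {
--     "Jax": ["Bastion", "Exotech"],
--     "Poppy": ["Bastion"],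
--     "Illaoi": ["Bastion", "Anima Squad"],
--     "Shyvana": ["Bastion"],
--     "Galio": ["Bastion"],
--     "Sejuani": ["Bastion", "Exotech"],
--     "Renekton": ["Bastion"],
--     "Sylas": ["Vanguard", "Anima Squad"],
--     "Vi": ["Vanguard"],
--     "Rhaast": ["Vanguard"],
--     "Skarner": ["Vanguard"],
--     "Braum": ["Vanguard", "Syndicate"],
--     "Jarvan IV": ["Vanguard"],
--     "Leona": ["Vanguard", "Anima Squad"],
--     "Alistar": ["Bruiser"],
--     "Dr Mundo": ["Bruiser", "street_demon Hex"],
--     "Darius": ["Bruiser", "Syndicate"],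
--     "Gragas": ["Bruiser"],
--     "Mordekaiser": ["Bruiser", "Exotech"],
--     "Chogath": ["Bruiser"],
--     "Kobuko": ["Bruiser"],
--     "Seraphine": ["Anima Squad"],
--     "Vayne": ["Anima Squad"],
--     "Yuumi": ["Anima Squad"],
--     "Xayah": ["Anima Squad"],
--     "Aurora": ["Anima Squad"],
--     "Jhin": ["Exotech"],
--     "Naafiri": ["Exotech"],
--     "Varus": ["Exotech"],
--     "Zeri": ["Exotech"],
--     "Zyra": ["street_demon Hex"],
--     "Ekko": ["street_demon Hex"],
--     "Jinx": ["street_demon Hex"],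
--     "Rengar": ["street_demon Hex"],
--     "Brand": ["street_demon Hex"],
--     "Neeko": ["street_demon Hex"],
--     "Shaco": ["Syndicate"],
--     "Twisted Fate": ["Syndicate"],
--     "Miss Fortune": ["Syndicate"],
-- }
--
--
-- def _tier(count, breakpoints):
--     for b, v in breakpoints:
--         if count >= b:
--             return v
--     return 0  # unreachable when count meets the activation threshold
--
--
-- def calculate_team_traits(champion_list):
--     counts = {}
--     for champ in champion_list:
--         for t in _CHAMP_TRAITS.get(champ, ()):
--             counts[t] = counts.get(t, 0) + 1
--     result = {}
--     for name, threshold, breakpoints in _TRAIT_TABLE: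
--         c = counts.get(name, 0)
--         if c >= threshold:
--             result[name] = _tier(c, breakpoints)
--     return result
-- ===== Notes on version B (the rewrite author's own statement) =====
-- stated objective: faster
-- what changed: A makes seven separate membership passes over champion_list (one per trait set) and assigns tiers in nested if/elif chains; B makes a single pass using a precomputed inverted index (champion -> its traits) to build a counts dict, then assigns tiers by scanning a static table of (trait, threshold, breakpoints).
import Mathlib
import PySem

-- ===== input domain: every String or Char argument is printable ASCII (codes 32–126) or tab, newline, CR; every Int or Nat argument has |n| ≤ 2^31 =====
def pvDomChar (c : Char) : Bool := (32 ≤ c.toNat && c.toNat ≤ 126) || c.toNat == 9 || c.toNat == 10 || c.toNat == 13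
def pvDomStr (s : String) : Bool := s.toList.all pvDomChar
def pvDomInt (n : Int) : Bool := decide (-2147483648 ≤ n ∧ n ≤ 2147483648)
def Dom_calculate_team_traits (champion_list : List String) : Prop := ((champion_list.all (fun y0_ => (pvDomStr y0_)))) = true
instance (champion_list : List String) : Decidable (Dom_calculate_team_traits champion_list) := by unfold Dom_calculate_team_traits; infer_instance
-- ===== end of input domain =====

-- B replaces A's seven membership passes by one pass over champion_list with a precomputed
-- inverted index (champion -> its traits) plus a static tier table (objective: faster, measured).

-- ===== PORT A =====
def bastion_champions : PySem.Set String := PySem.Set.ofList ["Jax", "Poppy", "Illaoi", "Shyvana", "Galio", "Sejuani", "Renekton"]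
def vanguard_champions : PySem.Set String := PySem.Set.ofList ["Sylas", "Vi", "Rhaast", "Skarner", "Braum", "Jarvan IV", "Leona"]
def bruiser_champions : PySem.Set String := PySem.Set.ofList ["Alistar", "Dr Mundo", "Darius", "Gragas", "Mordekaiser", "Chogath", "Kobuko"]
def anima_champions : PySem.Set String := PySem.Set.ofList ["Seraphine", "Sylas", "Illaoi", "Vayne", "Yuumi", "Leona", "Xayah", "Aurora"]
def exotech_champions : PySem.Set String := PySem.Set.ofList ["Jax", "Jhin", "Naafiri", "Mordekaiser", "Varus", "Sejuani", "Zeri"]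
def street_demon_champions : PySem.Set String := PySem.Set.ofList ["Dr Mundo", "Zyra", "Ekko", "Jinx", "Rengar", "Brand", "Neeko"]
def syndicate_champions : PySem.Set String := PySem.Set.ofList ["Shaco", "Darius", "Twisted Fate", "Braum", "Miss Fortune"]

def calculate_team_traits (champion_list : List String) : List (String × Int) :=
  let traits : PySem.Dict String Int := PySem.Dict.empty
  -- sum(1 for champ in champion_list if champ in <set>), one generator per trait
  let bastion_count : Int := champion_list.foldl (fun acc champ => if bastion_champions.contains champ then acc + 1 else acc) 0
  let vanguard_count : Int := champion_list.foldl (fun acc champ => if vanguard_champions.contains champ then acc + 1 else acc) 0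
  let bruiser_count : Int := champion_list.foldl (fun acc champ => if bruiser_champions.contains champ then acc + 1 else acc) 0
  let anima_count : Int := champion_list.foldl (fun acc champ => if anima_champions.contains champ then acc + 1 else acc) 0
  let exotech_count : Int := champion_list.foldl (fun acc champ => if exotech_champions.contains champ then acc + 1 else acc) 0
  let street_demon_count : Int := champion_list.foldl (fun acc champ => if street_demon_champions.contains champ then acc + 1 else acc) 0
  let syndicate_count : Int := champion_list.foldl (fun acc champ => if syndicate_champions.contains champ then acc + 1 else acc) 0
  let traits := if bastion_count ≥ 2 then traits.insert "Bastion" (if bastion_count ≥ 6 then 6 else if bastion_count ≥ 4 then 4 else 2) else traits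
  let traits := if vanguard_count ≥ 2 then traits.insert "Vanguard" (if vanguard_count ≥ 6 then 6 else if vanguard_count ≥ 4 then 4 else 2) else traits
  let traits := if bruiser_count ≥ 2 then traits.insert "Bruiser" (if bruiser_count ≥ 6 then 6 else if bruiser_count ≥ 4 then 4 else 2) else traits
  let traits := if anima_count ≥ 3 then
      (if anima_count ≥ 10 then traits.insert "Anima Squad" 10
       else if anima_count ≥ 7 then traits.insert "Anima Squad" 7
       else if anima_count ≥ 5 then traits.insert "Anima Squad" 5
       else traits.insert "Anima Squad" 3)
    else traits
  let traits := if exotech_count ≥ 3 then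
      (if exotech_count ≥ 10 then traits.insert "Exotech" 10
       else if exotech_count ≥ 7 then traits.insert "Exotech" 7
       else if exotech_count ≥ 5 then traits.insert "Exotech" 5
       else traits.insert "Exotech" 3)
    else traits
  let traits := if street_demon_count ≥ 3 then
      (if street_demon_count ≥ 10 then traits.insert "street_demon Hex" 10
       else if street_demon_count ≥ 7 then traits.insert "street_demon Hex" 7
       else if street_demon_count ≥ 5 then traits.insert "street_demon Hex" 5
       else traits.insert "street_demon Hex" 3)
    else traits
  let traits := if syndicate_count ≥ 3 then traits.insert "Syndicate" (if syndicate_count ≥ 7 then 7 else if syndicate_count ≥ 5 then 5 else 3) else traits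
  traits.items

-- ===== PORT B =====
def pvTraitTable : List (String × Int × List (Int × Int)) := [
  ("Bastion", 2, [(6, 6), (4, 4), (2, 2)]),
  ("Vanguard", 2, [(6, 6), (4, 4), (2, 2)]),
  ("Bruiser", 2, [(6, 6), (4, 4), (2, 2)]),
  ("Anima Squad", 3, [(10, 10), (7, 7), (5, 5), (3, 3)]),
  ("Exotech", 3, [(10, 10), (7, 7), (5, 5), (3, 3)]),
  ("street_demon Hex", 3, [(10, 10), (7, 7), (5, 5), (3, 3)]),
  ("Syndicate", 3, [(7, 7), (5, 5), (3, 3)])]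

-- inverted index: champion name -> list of traits it belongs to (a literal dict in Source B)
def pvChampTraitsItems : List (String × List String) := [
  ("Jax", ["Bastion", "Exotech"]), ("Poppy", ["Bastion"]), ("Illaoi", ["Bastion", "Anima Squad"]),
  ("Shyvana", ["Bastion"]), ("Galio", ["Bastion"]), ("Sejuani", ["Bastion", "Exotech"]),
  ("Renekton", ["Bastion"]), ("Sylas", ["Vanguard", "Anima Squad"]), ("Vi", ["Vanguard"]),
  ("Rhaast", ["Vanguard"]), ("Skarner", ["Vanguard"]), ("Braum", ["Vanguard", "Syndicate"]),
  ("Jarvan IV", ["Vanguard"]), ("Leona", ["Vanguard", "Anima Squad"]), ("Alistar", ["Bruiser"]),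
  ("Dr Mundo", ["Bruiser", "street_demon Hex"]), ("Darius", ["Bruiser", "Syndicate"]),
  ("Gragas", ["Bruiser"]), ("Mordekaiser", ["Bruiser", "Exotech"]), ("Chogath", ["Bruiser"]),
  ("Kobuko", ["Bruiser"]), ("Seraphine", ["Anima Squad"]), ("Vayne", ["Anima Squad"]),
  ("Yuumi", ["Anima Squad"]), ("Xayah", ["Anima Squad"]), ("Aurora", ["Anima Squad"]),
  ("Jhin", ["Exotech"]), ("Naafiri", ["Exotech"]), ("Varus", ["Exotech"]), ("Zeri", ["Exotech"]),
  ("Zyra", ["street_demon Hex"]), ("Ekko", ["street_demon Hex"]), ("Jinx", ["street_demon Hex"]),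
  ("Rengar", ["street_demon Hex"]), ("Brand", ["street_demon Hex"]), ("Neeko", ["street_demon Hex"]),
  ("Shaco", ["Syndicate"]), ("Twisted Fate", ["Syndicate"]), ("Miss Fortune", ["Syndicate"])]

def pvChampTraits : PySem.Dict String (List String) := PySem.Dict.ofList pvChampTraitsItems

-- _tier: first breakpoint the count meets (returns 0 only when none matches, unreachable under the threshold guard)
def pvTier (count : Int) (breakpoints : List (Int × Int)) : Int :=
  match breakpoints with
  | [] => 0
  | (b, v) :: rest => if count ≥ b then v else pvTier count rest

def calculate_team_traits_alt (champion_list : List String) : List (String × Int) :=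
  let counts : PySem.Dict String Int := champion_list.foldl
    (fun d champ => (pvChampTraits.getD champ []).foldl (fun d t => d.insert t (d.getD t 0 + 1)) d)
    PySem.Dict.empty
  let result : PySem.Dict String Int := pvTraitTable.foldl
    (fun r e =>
      let c := counts.getD e.1 0
      if c ≥ e.2.1 then r.insert e.1 (pvTier c e.2.2) else r)
    PySem.Dict.empty
  result.items

-- ===== PRECONDITION & SPEC =====
def Spec_calculate_team_traits (champion_list : List String) (out : List (String × Int)) : Prop := out = calculate_team_traits_alt champion_list
instance (champion_list : List String) (out : List (String × Int)) : Decidable (Spec_calculate_team_traits champion_list out) := by unfold Spec_calculate_team_traits; infer_instance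

-- ===== CLAIM (what is proved, stated in full; the proofs are below) =====
def Claim_equal_calculate_team_traits : Prop := ∀ (champion_list : List String), Dom_calculate_team_traits champion_list → Spec_calculate_team_traits champion_list (calculate_team_traits champion_list)

-- ===== LEMMAS AND PROOFS =====

-- the counting loop of B: final count of a trait name = initial count + sum of per-champion occurrences
theorem pv_counts_loop (xs : List String) (d : PySem.Dict String Int) (t : String) :
    (xs.foldl (fun d champ => (pvChampTraits.getD champ []).foldl (fun d t => d.insert t (d.getD t 0 + 1)) d) d).getD t 0
      = d.getD t 0 + ((xs.map (fun c => ((pvChampTraits.getD c []).count t : Int))).sum) := by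
  induction xs generalizing d with
  | nil => simp only [List.foldl_nil, List.map_nil, List.sum_nil, add_zero]
  | cons x xs ih =>
    simp only [List.foldl_cons, List.map_cons, List.sum_cons, ih,
      PySem.Dict.getD_foldl_insert_add_one]
    ring

-- per-trait membership, phrased as counts in the inverted index
set_option maxRecDepth 8192 in
set_option maxHeartbeats 1000000 in
theorem pv_dict_eq : pvChampTraits = PySem.Dict.mk pvChampTraitsItems := by decide

set_option maxRecDepth 8192 in
set_option maxHeartbeats 1000000 in
theorem pv_counts_char (c : String) :
    ((pvChampTraits.getD c []).count "Bastion" : Int) = (if bastion_champions.contains c then 1 else 0) ∧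
    ((pvChampTraits.getD c []).count "Vanguard" : Int) = (if vanguard_champions.contains c then 1 else 0) ∧
    ((pvChampTraits.getD c []).count "Bruiser" : Int) = (if bruiser_champions.contains c then 1 else 0) ∧
    ((pvChampTraits.getD c []).count "Anima Squad" : Int) = (if anima_champions.contains c then 1 else 0) ∧
    ((pvChampTraits.getD c []).count "Exotech" : Int) = (if exotech_champions.contains c then 1 else 0) ∧
    ((pvChampTraits.getD c []).count "street_demon Hex" : Int) = (if street_demon_champions.contains c then 1 else 0) ∧
    ((pvChampTraits.getD c []).count "Syndicate" : Int) = (if syndicate_champions.contains c then 1 else 0) := by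
  rw [show bastion_champions = ["Jax", "Poppy", "Illaoi", "Shyvana", "Galio", "Sejuani", "Renekton"] from by decide]
  rw [show vanguard_champions = ["Sylas", "Vi", "Rhaast", "Skarner", "Braum", "Jarvan IV", "Leona"] from by decide]
  rw [show bruiser_champions = ["Alistar", "Dr Mundo", "Darius", "Gragas", "Mordekaiser", "Chogath", "Kobuko"] from by decide]
  rw [show anima_champions = ["Seraphine", "Sylas", "Illaoi", "Vayne", "Yuumi", "Leona", "Xayah", "Aurora"] from by decide]
  rw [show exotech_champions = ["Jax", "Jhin", "Naafiri", "Mordekaiser", "Varus", "Sejuani", "Zeri"] from by decide]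
  rw [show street_demon_champions = ["Dr Mundo", "Zyra", "Ekko", "Jinx", "Rengar", "Brand", "Neeko"] from by decide]
  rw [show syndicate_champions = ["Shaco", "Darius", "Twisted Fate", "Braum", "Miss Fortune"] from by decide]
  by_cases hc : c ∈ ["Jax", "Poppy", "Illaoi", "Shyvana", "Galio", "Sejuani", "Renekton", "Sylas", "Vi", "Rhaast", "Skarner", "Braum", "Jarvan IV", "Leona", "Alistar", "Dr Mundo", "Darius", "Gragas", "Mordekaiser", "Chogath", "Kobuko", "Seraphine", "Vayne", "Yuumi", "Xayah", "Aurora", "Jhin", "Naafiri", "Varus", "Zeri", "Zyra", "Ekko", "Jinx", "Rengar", "Brand", "Neeko", "Shaco", "Twisted Fate", "Miss Fortune"]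
  · simp only [List.mem_cons, List.not_mem_nil, or_false] at hc
    rcases hc with rfl|rfl|rfl|rfl|rfl|rfl|rfl|rfl|rfl|rfl|rfl|rfl|rfl|rfl|rfl|rfl|rfl|rfl|rfl|rfl|rfl|rfl|rfl|rfl|rfl|rfl|rfl|rfl|rfl|rfl|rfl|rfl|rfl|rfl|rfl|rfl|rfl|rfl|rfl <;> exact (by decide)
  · simp only [List.mem_cons, List.not_mem_nil, or_false, not_or] at hc
    obtain ⟨h1, h2, h3, h4, h5, h6, h7, h8, h9, h10, h11, h12, h13, h14, h15, h16, h17, h18, h19, h20, h21, h22, h23, h24, h25, h26, h27, h28, h29, h30, h31, h32, h33, h34, h35, h36, h37, h38, h39⟩ := hc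
    have hD : pvChampTraits.getD c [] = [] := by
      rw [pv_dict_eq]
      simp only [pvChampTraitsItems, PySem.Dict.getD_eq_get?_getD, PySem.Dict.get?_mk_cons,
        beq_iff_eq, Ne.symm h1, Ne.symm h2, Ne.symm h3, Ne.symm h4, Ne.symm h5, Ne.symm h6, Ne.symm h7, Ne.symm h8, Ne.symm h9, Ne.symm h10, Ne.symm h11, Ne.symm h12, Ne.symm h13, Ne.symm h14, Ne.symm h15, Ne.symm h16, Ne.symm h17, Ne.symm h18, Ne.symm h19, Ne.symm h20, Ne.symm h21, Ne.symm h22, Ne.symm h23, Ne.symm h24, Ne.symm h25, Ne.symm h26, Ne.symm h27, Ne.symm h28, Ne.symm h29, Ne.symm h30, Ne.symm h31, Ne.symm h32, Ne.symm h33, Ne.symm h34, Ne.symm h35, Ne.symm h36, Ne.symm h37, Ne.symm h38, Ne.symm h39, if_false]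
      rfl
    simp only [hD, List.count_nil, PySem.Set.contains, List.contains_eq_mem, List.mem_cons,
      List.not_mem_nil, or_false, h1, h2, h3, h4, h5, h6, h7, h8, h9, h10, h11, h12, h13, h14, h15, h16, h17, h18, h19, h20, h21, h22, h23, h24, h25, h26, h27, h28, h29, h30, h31, h32, h33, h34, h35, h36, h37, h38, h39, decide_eq_true_eq, Nat.cast_zero]
    simp

-- trait-by-trait congruence steps: A's nested-if tier equals B's pvTier over the same breakpoints
theorem pv_step_246 (c : Int) (d d' : PySem.Dict String Int) (k : String) (h : d = d') :
    (if c ≥ 2 then d.insert k (if c ≥ 6 then 6 else if c ≥ 4 then 4 else 2) else d)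
      = (if c ≥ 2 then d'.insert k (pvTier c [(6, 6), (4, 4), (2, 2)]) else d') := by
  subst h; simp only [pvTier]; split_ifs <;> rfl

theorem pv_step_anima (c : Int) (d d' : PySem.Dict String Int) (k : String) (h : d = d') :
    (if c ≥ 3 then
        (if c ≥ 10 then d.insert k 10 else if c ≥ 7 then d.insert k 7
         else if c ≥ 5 then d.insert k 5 else d.insert k 3)
      else d)
      = (if c ≥ 3 then d'.insert k (pvTier c [(10, 10), (7, 7), (5, 5), (3, 3)]) else d') := by
  subst h; simp only [pvTier]; split_ifs <;> rfl

theorem pv_step_357 (c : Int) (d d' : PySem.Dict String Int) (k : String) (h : d = d') :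
    (if c ≥ 3 then d.insert k (if c ≥ 7 then 7 else if c ≥ 5 then 5 else 3) else d)
      = (if c ≥ 3 then d'.insert k (pvTier c [(7, 7), (5, 5), (3, 3)]) else d') := by
  subst h; simp only [pvTier]; split_ifs <;> rfl

-- ===== VERDICT (by name: the statement is the Claim_ definition above) =====
set_option maxHeartbeats 1000000 in
theorem calculate_team_traits_spec : Claim_equal_calculate_team_traits := by
  intro champion_list _
  show calculate_team_traits champion_list = calculate_team_traits_alt champion_list
  simp only [calculate_team_traits, calculate_team_traits_alt, pvTraitTable,
    List.foldl_cons, List.foldl_nil]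
  have hB : (champion_list.foldl (fun d champ => (pvChampTraits.getD champ []).foldl (fun d t => d.insert t (d.getD t 0 + 1)) d) (PySem.Dict.empty : PySem.Dict String Int)).getD "Bastion" 0 = champion_list.foldl (fun acc champ => if bastion_champions.contains champ then acc + 1 else acc) (0 : Int) := by
    rw [pv_counts_loop, List.map_congr_left (fun c _ => (pv_counts_char c).1),
      PySem.List.sum_map_ite_one_zero, PySem.List.foldl_count_if, PySem.Dict.getD_empty]
  have hV : (champion_list.foldl (fun d champ => (pvChampTraits.getD champ []).foldl (fun d t => d.insert t (d.getD t 0 + 1)) d) (PySem.Dict.empty : PySem.Dict String Int)).getD "Vanguard" 0 = champion_list.foldl (fun acc champ => if vanguard_champions.contains champ then acc + 1 else acc) (0 : Int) := by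
    rw [pv_counts_loop, List.map_congr_left (fun c _ => (pv_counts_char c).2.1),
      PySem.List.sum_map_ite_one_zero, PySem.List.foldl_count_if, PySem.Dict.getD_empty]
  have hR : (champion_list.foldl (fun d champ => (pvChampTraits.getD champ []).foldl (fun d t => d.insert t (d.getD t 0 + 1)) d) (PySem.Dict.empty : PySem.Dict String Int)).getD "Bruiser" 0 = champion_list.foldl (fun acc champ => if bruiser_champions.contains champ then acc + 1 else acc) (0 : Int) := by
    rw [pv_counts_loop, List.map_congr_left (fun c _ => (pv_counts_char c).2.2.1),
      PySem.List.sum_map_ite_one_zero, PySem.List.foldl_count_if, PySem.Dict.getD_empty]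
  have hA : (champion_list.foldl (fun d champ => (pvChampTraits.getD champ []).foldl (fun d t => d.insert t (d.getD t 0 + 1)) d) (PySem.Dict.empty : PySem.Dict String Int)).getD "Anima Squad" 0 = champion_list.foldl (fun acc champ => if anima_champions.contains champ then acc + 1 else acc) (0 : Int) := by
    rw [pv_counts_loop, List.map_congr_left (fun c _ => (pv_counts_char c).2.2.2.1),
      PySem.List.sum_map_ite_one_zero, PySem.List.foldl_count_if, PySem.Dict.getD_empty]
  have hE : (champion_list.foldl (fun d champ => (pvChampTraits.getD champ []).foldl (fun d t => d.insert t (d.getD t 0 + 1)) d) (PySem.Dict.empty : PySem.Dict String Int)).getD "Exotech" 0 = champion_list.foldl (fun acc champ => if exotech_champions.contains champ then acc + 1 else acc) (0 : Int) := by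
    rw [pv_counts_loop, List.map_congr_left (fun c _ => (pv_counts_char c).2.2.2.2.1),
      PySem.List.sum_map_ite_one_zero, PySem.List.foldl_count_if, PySem.Dict.getD_empty]
  have hS : (champion_list.foldl (fun d champ => (pvChampTraits.getD champ []).foldl (fun d t => d.insert t (d.getD t 0 + 1)) d) (PySem.Dict.empty : PySem.Dict String Int)).getD "street_demon Hex" 0 = champion_list.foldl (fun acc champ => if street_demon_champions.contains champ then acc + 1 else acc) (0 : Int) := by
    rw [pv_counts_loop, List.map_congr_left (fun c _ => (pv_counts_char c).2.2.2.2.2.1),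
      PySem.List.sum_map_ite_one_zero, PySem.List.foldl_count_if, PySem.Dict.getD_empty]
  have hY : (champion_list.foldl (fun d champ => (pvChampTraits.getD champ []).foldl (fun d t => d.insert t (d.getD t 0 + 1)) d) (PySem.Dict.empty : PySem.Dict String Int)).getD "Syndicate" 0 = champion_list.foldl (fun acc champ => if syndicate_champions.contains champ then acc + 1 else acc) (0 : Int) := by
    rw [pv_counts_loop, List.map_congr_left (fun c _ => (pv_counts_char c).2.2.2.2.2.2),
      PySem.List.sum_map_ite_one_zero, PySem.List.foldl_count_if, PySem.Dict.getD_empty]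
  rw [hB, hV, hR, hA, hE, hS, hY]
  exact congrArg PySem.Dict.items
    (pv_step_357 _ _ _ _ (pv_step_anima _ _ _ _ (pv_step_anima _ _ _ _ (pv_step_anima _ _ _ _
      (pv_step_246 _ _ _ _ (pv_step_246 _ _ _ _ (pv_step_246 _ _ _ _ rfl)))))))
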